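-- pv_equiv track=rewrite | github.com/maxipdev/Introduccion-a-la-programacion-1-UBA | parciales/segundo parcial (Python)/Parcial.py | cantidad_parejas_que_suman
-- ===== SOURCE A (Python) =====
-- def cantidad_parejas_que_suman(s: list[int], n: int) -> int:
--     cantidad: int = 0
--     for i in range(len(s)):
--         a: int = s[i]
--         for j in range(i, len(s)):
--             b: int = s[j]
--
--             #miro que no tienen que ser el mismo elemento:
--             if a == b:
--                 continue #queremos q no lo cuente
--
--             #Verifico si cumple con la condición:
--             if a + b == n:
--                 cantidad += 1
--
--     return cantidad
-- ===== SOURCE B (Python) =====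
-- def cantidad_parejas_que_suman(s: list[int], n: int) -> int:
--     # One pass: for each element x, add how many earlier elements equal n - x,
--     # skipping the case where the two values would be equal (2*x == n).
--     seen: dict[int, int] = {}
--     cantidad: int = 0
--     for x in s:
--         if 2 * x != n:
--             cantidad += seen.get(n - x, 0)
--         seen[x] = seen.get(x, 0) + 1
--     return cantidad
-- ===== Notes on version B (the rewrite author's own statement) =====
-- stated objective: faster
-- what changed: Replaced the quadratic double index loop with a single left-to-right pass that keeps a dict of counts of seen values and adds the count of the complement n-x (skipped when 2*x == n, which is exactly A's equal-values exclusion).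
import Mathlib
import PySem

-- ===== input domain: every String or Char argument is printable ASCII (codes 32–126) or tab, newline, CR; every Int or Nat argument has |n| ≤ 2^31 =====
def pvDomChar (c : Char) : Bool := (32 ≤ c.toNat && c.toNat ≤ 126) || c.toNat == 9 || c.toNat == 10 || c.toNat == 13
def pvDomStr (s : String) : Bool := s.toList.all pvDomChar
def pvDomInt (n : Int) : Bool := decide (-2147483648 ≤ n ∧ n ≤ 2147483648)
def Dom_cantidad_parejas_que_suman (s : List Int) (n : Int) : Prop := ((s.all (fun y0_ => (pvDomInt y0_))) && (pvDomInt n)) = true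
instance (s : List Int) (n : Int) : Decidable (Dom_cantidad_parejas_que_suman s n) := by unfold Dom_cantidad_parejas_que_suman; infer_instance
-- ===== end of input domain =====

-- B replaces A's quadratic double index loop by one pass with a dict counting seen values (asymptotically faster).

-- ===== PORT A =====
def cantidad_parejas_que_suman (s : List Int) (n : Int) : Int :=
  (PySem.List.pyRange 0 (PySem.List.len s) 1).foldl (fun cantidad i =>
    let a : Int := PySem.List.pyGetD s i 0   -- s[i]; i always in range here
    (PySem.List.pyRange i (PySem.List.len s) 1).foldl (fun cantidad j =>
      let b : Int := PySem.List.pyGetD s j 0 -- s[j]; j always in range here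
      if a == b then cantidad
      else if a + b == n then cantidad + 1 else cantidad) cantidad) 0

-- ===== PORT B =====
def cantidad_parejas_que_suman_alt (s : List Int) (n : Int) : Int :=
  (s.foldl (fun st x =>
      let cantidad := if 2 * x ≠ n then st.1 + st.2.getD (n - x) 0 else st.1
      (cantidad, st.2.insert x (st.2.getD x 0 + 1)))
    ((0 : Int), (PySem.Dict.empty : PySem.Dict Int Int))).1

-- ===== PRECONDITION & SPEC =====
def Spec_cantidad_parejas_que_suman (s : List Int) (n : Int) (out : Int) : Prop := out = cantidad_parejas_que_suman_alt s n
instance (s : List Int) (n : Int) (out : Int) : Decidable (Spec_cantidad_parejas_que_suman s n out) := by unfold Spec_cantidad_parejas_que_suman; infer_instance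

-- ===== CLAIM (what is proved, stated in full; the proofs are below) =====
def Claim_equal_cantidad_parejas_que_suman : Prop := ∀ (s : List Int) (n : Int), Dom_cantidad_parejas_que_suman s n → Spec_cantidad_parejas_que_suman s n (cantidad_parejas_que_suman s n)

-- ===== LEMMAS AND PROOFS =====

-- common specification: for each element x, count the strictly-later elements b with b ≠ x and x + b = n
def pvG (n : Int) : List Int → Int
  | [] => 0
  | x :: r => ((r.countP (fun b => decide (x ≠ b ∧ x + b = n))) : Int) + pvG n r

-- the per-position count the inner predicate produces equals a plain complement count
lemma pvCountP_eq (n x : Int) (r : List Int) :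
    ((r.countP (fun b => decide (x ≠ b ∧ x + b = n))) : Int)
      = if 2 * x = n then 0 else (r.count (n - x) : Int) := by
  split_ifs with h
  · have : r.countP (fun b => decide (x ≠ b ∧ x + b = n)) = 0 := by
      rw [List.countP_eq_zero]
      simp only [decide_eq_true_eq, not_and]
      intro b _ hne hb
      exact hne (by omega)
    rw [this]; simp
  · have : r.countP (fun b => decide (x ≠ b ∧ x + b = n)) = r.count (n - x) := by
      rw [List.count]
      apply List.countP_congr
      intro b _
      simp only [decide_eq_true_eq, beq_iff_eq]
      constructor
      · rintro ⟨hne, hb⟩; omega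
      · intro hb; constructor <;> omega
    rw [this]
  
-- ---- A side ----

-- the natural-index sum A computes
def pvSA (n : Int) (s : List Int) : Int :=
  ((List.range s.length).map (fun k =>
     ((s.drop k).countP (fun b => decide (s.getD k 0 ≠ b ∧ s.getD k 0 + b = n)) : Int))).sum

-- the inner if-chain is a conditional '+1'
lemma pvBody_eq (a n cant b : Int) :
    (if a == b then cant else if a + b == n then cant + 1 else cant)
      = if a ≠ b ∧ a + b = n then cant + 1 else cant := by
  split_ifs with h1 h2 h3 h4 <;> simp_all

lemma pvInner (s : List Int) (n : Int) (k : Nat) (cant : Int) :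
    (PySem.List.pyRange (k : Int) (PySem.List.len s) 1).foldl
      (fun cantidad j =>
        if PySem.List.pyGetD s (k : Int) 0 == PySem.List.pyGetD s j 0 then cantidad
        else if PySem.List.pyGetD s (k : Int) 0 + PySem.List.pyGetD s j 0 == n then cantidad + 1
        else cantidad) cant
    = cant + ((s.drop k).countP
        (fun b => decide (s.getD k 0 ≠ b ∧ s.getD k 0 + b = n)) : Int) := by
  rw [PySem.List.foldl_pyRange_pyGetD s 0
      (fun c b => if PySem.List.pyGetD s (k : Int) 0 == b then c
        else if PySem.List.pyGetD s (k : Int) 0 + b == n then c + 1 else c) cant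
      (Int.natCast_nonneg k)]
  simp only [pvBody_eq _ n]
  rw [PySem.List.foldl_ite_add_one]
  rw [PySem.List.pyGetD_natCast]
  simp [List.getD_eq_getElem?_getD]

lemma pvA_eq_SA (s : List Int) (n : Int) : cantidad_parejas_que_suman s n = pvSA n s := by
  unfold cantidad_parejas_que_suman
  rw [PySem.List.pyRange_one 0 (PySem.List.len s), List.foldl_map]
  simp only [zero_add]
  simp only [pvInner s n]
  rw [PySem.List.foldl_add]
  unfold pvSA
  simp [PySem.List.len_eq]

lemma pvSA_eq_G (s : List Int) (n : Int) : pvSA n s = pvG n s := by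
  induction s with
  | nil => rfl
  | cons x r ih =>
    unfold pvSA
    rw [show (x :: r).length = r.length + 1 from rfl, List.range_succ_eq_map]
    simp only [List.map_cons, List.map_map, List.sum_cons]
    have hhead : ((x :: r).drop 0).countP
        (fun b => decide ((x :: r).getD 0 0 ≠ b ∧ (x :: r).getD 0 0 + b = n))
        = r.countP (fun b => decide (x ≠ b ∧ x + b = n)) := by
      simp
    rw [hhead]
    show _ = pvG n (x :: r)
    simp only [pvG]
    -- the shifted tail sum is definitionally pvSA n r; congr closes it with ih
    congr 1

-- ---- B side ----

-- abstract form of B's loop: p is the list of already-seen elements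
def pvBfun (n : Int) (p : List Int) : List Int → Int
  | [] => 0
  | x :: r => (if 2 * x = n then 0 else (p.count (n - x) : Int)) + pvBfun n (p ++ [x]) r

lemma pvBloop (n : Int) (l : List Int) :
    ∀ (p : List Int) (acc : Int) (d : PySem.Dict Int Int),
      (∀ v, d.getD v 0 = (p.count v : Int)) →
      (l.foldl (fun st x =>
        let cantidad := if 2 * x ≠ n then st.1 + st.2.getD (n - x) 0 else st.1
        (cantidad, st.2.insert x (st.2.getD x 0 + 1))) (acc, d)).1
        = acc + pvBfun n p l := by
  induction l with
  | nil => intro p acc d _; simp [pvBfun]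
  | cons x r ih =>
    intro p acc d hinv
    simp only [List.foldl_cons]
    rw [ih (p ++ [x]) _ _ (by
      intro v
      rw [PySem.Dict.getD_insert]
      split_ifs with hv
      · subst hv; rw [hinv]; simp [List.count_append]
      · rw [hinv]; simp [List.count_append, List.count_singleton]
        omega)]
    simp only [pvBfun, hinv]
    split_ifs with h1 h2 <;> omega

lemma pvBfun_congr (n : Int) (l : List Int) :
    ∀ p p', (∀ v : Int, p.count v = p'.count v) → pvBfun n p l = pvBfun n p' l := by
  induction l with
  | nil => intro p p' _; rfl
  | cons x r ih =>
    intro p p' h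
    simp only [pvBfun, h]
    congr 1
    exact ih _ _ (by intro v; simp [List.count_append, h v])

lemma pvBfun_snoc (n x : Int) (r : List Int) :
    ∀ p, pvBfun n (p ++ [x]) r = (if 2 * x = n then 0 else (r.count (n - x) : Int)) + pvBfun n p r := by
  induction r with
  | nil => intro p; simp [pvBfun]
  | cons y r' ih =>
    intro p
    simp only [pvBfun]
    rw [pvBfun_congr n r' (p ++ [x] ++ [y]) (p ++ [y] ++ [x])
        (by intro v; simp [List.count_append, List.count_cons, List.count_nil]; omega),
      ih (p ++ [y])]
    by_cases h2 : 2 * x = n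
    · by_cases h1 : 2 * y = n
      · simp [h1, h2]
      · have hxy : ¬ x = n - y := by omega
        simp [h1, h2, List.count_append, List.count_nil, hxy]
        try ring
    · by_cases h3 : y = n - x
      · subst h3
        have h1 : ¬ 2 * (n - x) = n := by omega
        simp [h1, h2, List.count_append,
          show n - (n - x) = x by omega]
        ring
      · have hxny : ¬ x = n - y := by omega
        by_cases h1 : 2 * y = n <;>
          · simp [h1, h2, h3, hxny, List.count_append, List.count_nil]
            try ring

lemma pvBfun_nil_eq_G (n : Int) (s : List Int) : pvBfun n [] s = pvG n s := by
  induction s with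
  | nil => rfl
  | cons x r ih =>
    show pvBfun n [] (x :: r) = pvG n (x :: r)
    simp only [pvBfun, pvG]
    rw [show ([] : List Int) ++ [x] = [] ++ [x] from rfl, pvBfun_snoc, ih, pvCountP_eq]
    simp

lemma pvB_eq_G (s : List Int) (n : Int) : cantidad_parejas_que_suman_alt s n = pvG n s := by
  unfold cantidad_parejas_que_suman_alt
  rw [pvBloop n s [] 0 PySem.Dict.empty (by intro v; simp [PySem.Dict.getD_empty]),
      pvBfun_nil_eq_G]
  ring

-- ===== VERDICT (by name: the statement is the Claim_ definition above) =====
theorem cantidad_parejas_que_suman_spec : Claim_equal_cantidad_parejas_que_suman := by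
  intro s n _
  unfold Spec_cantidad_parejas_que_suman
  rw [pvA_eq_SA, pvSA_eq_G, pvB_eq_G]
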